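-- pv_equiv track=rewrite | github.com/marble25/AlgorithmPractice | 14889.py | check_ability
-- ===== SOURCE A (Python) =====
-- def calculate_score(team, n, s):
--     score = 0
--     for i in range(len(team)):
--         for j in range(len(team)):
--             score += s[team[i]][team[j]]
--
--     return score
--
-- def check_ability(team, n, s):
--     team1 = []
--     team2 = []
--     for i in range(n):
--         if team[i] == 1:
--             team1.append(i)
--         else:
--             team2.append(i)
--
--     team1_score = calculate_score(team1, n, s)
--     team2_score = calculate_score(team2, n, s)
--
--     return abs(team1_score - team2_score)
-- ===== SOURCE B (Python) =====
-- def check_ability(team, n, s):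
--     score1 = 0
--     score2 = 0
--     for i in range(n):
--         for j in range(n):
--             if team[i] == 1 and team[j] == 1:
--                 score1 += s[i][j]
--             elif team[i] != 1 and team[j] != 1:
--                 score2 += s[i][j]
--     return abs(score1 - score2)
-- ===== Notes on version B (the rewrite author's own statement) =====
-- stated objective: simpler
-- what changed: B drops A's intermediate team1/team2 index lists and helper calculate_score entirely: one pass over all (i,j) pairs classifies each cell inline into score1/score2.
import Mathlib
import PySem

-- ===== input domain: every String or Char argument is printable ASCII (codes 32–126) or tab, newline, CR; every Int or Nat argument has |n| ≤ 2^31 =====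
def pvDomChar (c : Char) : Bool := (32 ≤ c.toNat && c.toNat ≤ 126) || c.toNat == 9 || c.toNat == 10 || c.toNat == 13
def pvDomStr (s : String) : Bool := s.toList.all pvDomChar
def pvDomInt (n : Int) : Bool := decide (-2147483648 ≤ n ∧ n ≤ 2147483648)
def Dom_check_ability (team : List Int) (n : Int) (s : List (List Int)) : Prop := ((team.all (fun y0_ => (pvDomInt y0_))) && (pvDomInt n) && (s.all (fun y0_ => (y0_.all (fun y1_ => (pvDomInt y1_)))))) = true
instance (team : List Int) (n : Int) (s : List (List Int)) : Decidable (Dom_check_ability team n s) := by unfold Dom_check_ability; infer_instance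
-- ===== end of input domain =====

-- B removes A's team1/team2 index lists and the calculate_score helper: a single pass over all
-- (i,j) pairs classifies each matrix cell inline (objective: simpler).

-- ===== PORT A =====
def pv_calculate_score (team : List Int) (n : Int) (s : List (List Int)) : Int :=
  (PySem.List.pyRange 0 (PySem.List.len team) 1).foldl (fun score i =>
    (PySem.List.pyRange 0 (PySem.List.len team) 1).foldl (fun score j =>
      score + PySem.List.pyGetD (PySem.List.pyGetD s (PySem.List.pyGetD team i 0) [])
                (PySem.List.pyGetD team j 0) 0) score) 0

def check_ability (team : List Int) (n : Int) (s : List (List Int)) : Int :=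
  let p := (PySem.List.pyRange 0 n 1).foldl (fun (p : List Int × List Int) i =>
    if PySem.List.pyGetD team i 0 = 1 then (p.1 ++ [i], p.2) else (p.1, p.2 ++ [i])) ([], [])
  |pv_calculate_score p.1 n s - pv_calculate_score p.2 n s|

-- ===== PORT B =====
def check_ability_alt (team : List Int) (n : Int) (s : List (List Int)) : Int :=
  let p := (PySem.List.pyRange 0 n 1).foldl (fun (acc : Int × Int) i =>
    (PySem.List.pyRange 0 n 1).foldl (fun (acc : Int × Int) j =>
      if PySem.List.pyGetD team i 0 = 1 ∧ PySem.List.pyGetD team j 0 = 1 then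
        (acc.1 + PySem.List.pyGetD (PySem.List.pyGetD s i []) j 0, acc.2)
      else if PySem.List.pyGetD team i 0 ≠ 1 ∧ PySem.List.pyGetD team j 0 ≠ 1 then
        (acc.1, acc.2 + PySem.List.pyGetD (PySem.List.pyGetD s i []) j 0)
      else acc) acc) (0, 0)
  |p.1 - p.2|

-- ===== PRECONDITION & SPEC =====
-- Pre_ excludes exactly the inputs on which A raises an IndexError: team must have at least n
-- entries, and s[i][j] must exist for every same-team pair (i, j) with i, j < n.
def Pre_check_ability (team : List Int) (n : Int) (s : List (List Int)) : Prop :=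
  n.toNat ≤ team.length ∧ n.toNat ≤ s.length ∧
    ∀ i : Nat, i < n.toNat → ∀ j : Nat, j < n.toNat →
      ((team.getD i 0 = 1) ↔ (team.getD j 0 = 1)) → j < (s.getD i []).length
instance (team : List Int) (n : Int) (s : List (List Int)) : Decidable (Pre_check_ability team n s) := by unfold Pre_check_ability; infer_instance

def pvWitness_check_ability : List Int × Int × List (List Int) :=
  ([1, 0, 1], 3, [[1, 2, 3], [4, 5, 6], [7, 8, 9]])

def Spec_check_ability (team : List Int) (n : Int) (s : List (List Int)) (out : Int) : Prop := out = check_ability_alt team n s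
instance (team : List Int) (n : Int) (s : List (List Int)) (out : Int) : Decidable (Spec_check_ability team n s out) := by unfold Spec_check_ability; infer_instance

-- ===== CLAIM (what is proved, stated in full; the proofs are below) =====
def Claim_equal_check_ability : Prop := ∀ (team : List Int) (n : Int) (s : List (List Int)), Dom_check_ability team n s → Pre_check_ability team n s → Spec_check_ability team n s (check_ability team n s)

-- ===== LEMMAS AND PROOFS =====

def pvA (s : List (List Int)) (i j : Int) : Int :=
  PySem.List.pyGetD (PySem.List.pyGetD s i []) j 0

theorem pv_sum_ite_filter (l : List Int) (p : Int → Prop) [DecidablePred p] (f : Int → Int) :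
    (l.map (fun x => if p x then f x else 0)).sum = ((l.filter (fun x => decide (p x))).map f).sum := by
  induction l with
  | nil => simp
  | cons x xs ih => by_cases h : p x <;> simp [h, ih]

theorem pv_double_ite_filter (l : List Int) (p : Int → Prop) [DecidablePred p]
    (a : Int → Int → Int) :
    (l.map (fun i => (l.map (fun j => if p i ∧ p j then a i j else 0)).sum)).sum
      = ((l.filter (fun x => decide (p x))).map
          (fun x => ((l.filter (fun y => decide (p y))).map (fun y => a x y)).sum)).sum := by
  rw [← pv_sum_ite_filter l p (fun x => ((l.filter (fun y => decide (p y))).map (fun y => a x y)).sum)]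
  congr 1
  apply List.map_congr_left
  intro i _
  by_cases hi : p i
  · simp only [hi, if_true, true_and]
    rw [← pv_sum_ite_filter l p (fun y => a i y)]
  · simp [hi]

theorem pv_partition_eq (team : List Int) (n : Int) :
    ((PySem.List.pyRange 0 n 1).foldl (fun (p : List Int × List Int) i =>
      if PySem.List.pyGetD team i 0 = 1 then (p.1 ++ [i], p.2) else (p.1, p.2 ++ [i])) ([], []))
    = ((PySem.List.pyRange 0 n 1).filter (fun i => decide ((PySem.List.pyGetD team i 0 = 1))),
       (PySem.List.pyRange 0 n 1).filter (fun i => decide (¬ (PySem.List.pyGetD team i 0 = 1)))) := by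
  have hstep : (fun (p : List Int × List Int) i =>
      if PySem.List.pyGetD team i 0 = 1 then (p.1 ++ [i], p.2) else (p.1, p.2 ++ [i]))
    = fun (p : List Int × List Int) i =>
      (if (PySem.List.pyGetD team i 0 = 1) then p.1 ++ [i] else p.1, if ¬ (PySem.List.pyGetD team i 0 = 1) then p.2 ++ [i] else p.2) := by
    funext p i
    by_cases h : PySem.List.pyGetD team i 0 = 1 <;> simp [h]
  rw [hstep, PySem.List.foldl_prod_mk
    (f := fun (acc : List Int) i => if (PySem.List.pyGetD team i 0 = 1) then acc ++ [i] else acc)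
    (g := fun (acc : List Int) i => if ¬ (PySem.List.pyGetD team i 0 = 1) then acc ++ [i] else acc)]
  rw [PySem.List.foldl_append_ite_eq_filter, PySem.List.foldl_append_ite_eq_filter]
  simp

theorem pv_calc_eq (t : List Int) (n : Int) (s : List (List Int)) :
    pv_calculate_score t n s = (t.map (fun x => (t.map (fun y => pvA s x y)).sum)).sum := by
  unfold pv_calculate_score
  simp only [pvA]
  rw [PySem.List.foldl_pyRange_zero_pyGetD t 0
    (fun (score : Int) (x : Int) => (PySem.List.pyRange 0 (PySem.List.len t) 1).foldl
      (fun score j => score + PySem.List.pyGetD (PySem.List.pyGetD s x [])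
        (PySem.List.pyGetD t j 0) 0) score) 0]
  have hx : ∀ x ∈ t, ∀ (score : Int),
      (PySem.List.pyRange 0 (PySem.List.len t) 1).foldl
        (fun score j => score + PySem.List.pyGetD (PySem.List.pyGetD s x [])
          (PySem.List.pyGetD t j 0) 0) score
      = score + (t.map (fun y => PySem.List.pyGetD (PySem.List.pyGetD s x []) y 0)).sum := by
    intro x _ score
    rw [PySem.List.foldl_pyRange_zero_pyGetD t 0
      (fun (score : Int) (y : Int) => score + PySem.List.pyGetD (PySem.List.pyGetD s x []) y 0) score]
    rw [PySem.List.foldl_add]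
  rw [PySem.List.foldl_congr_mem' (l := t)
    (f := fun (score : Int) (x : Int) => (PySem.List.pyRange 0 (PySem.List.len t) 1).foldl
      (fun score j => score + PySem.List.pyGetD (PySem.List.pyGetD s x [])
        (PySem.List.pyGetD t j 0) 0) score)
    (g := fun (score : Int) (x : Int) =>
      score + (t.map (fun y => PySem.List.pyGetD (PySem.List.pyGetD s x []) y 0)).sum)
    (init := 0)
    hx]
  rw [PySem.List.foldl_add]
  simp

theorem pv_alt_eq (team : List Int) (n : Int) (s : List (List Int)) :
    check_ability_alt team n s =
      |((PySem.List.pyRange 0 n 1).map (fun i => ((PySem.List.pyRange 0 n 1).map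
          (fun j => if (PySem.List.pyGetD team i 0 = 1) ∧ (PySem.List.pyGetD team j 0 = 1) then pvA s i j else 0)).sum)).sum
       - ((PySem.List.pyRange 0 n 1).map (fun i => ((PySem.List.pyRange 0 n 1).map
          (fun j => if ¬ (PySem.List.pyGetD team i 0 = 1) ∧ ¬ (PySem.List.pyGetD team j 0 = 1) then pvA s i j else 0)).sum)).sum| := by
  unfold check_ability_alt
  have hstep : ∀ i : Int, (fun (acc : Int × Int) j =>
      if PySem.List.pyGetD team i 0 = 1 ∧ PySem.List.pyGetD team j 0 = 1 then
        (acc.1 + PySem.List.pyGetD (PySem.List.pyGetD s i []) j 0, acc.2)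
      else if PySem.List.pyGetD team i 0 ≠ 1 ∧ PySem.List.pyGetD team j 0 ≠ 1 then
        (acc.1, acc.2 + PySem.List.pyGetD (PySem.List.pyGetD s i []) j 0)
      else acc)
    = fun (acc : Int × Int) j =>
      (acc.1 + (if (PySem.List.pyGetD team i 0 = 1) ∧ (PySem.List.pyGetD team j 0 = 1) then pvA s i j else 0),
       acc.2 + (if ¬ (PySem.List.pyGetD team i 0 = 1) ∧ ¬ (PySem.List.pyGetD team j 0 = 1) then pvA s i j else 0)) := by
    intro i
    funext acc j
    simp only [pvA]
    by_cases hi : PySem.List.pyGetD team i 0 = 1 <;>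
      by_cases hj : PySem.List.pyGetD team j 0 = 1 <;> simp [hi, hj]
  simp only [hstep]
  have hinner : ∀ (i : Int) (acc : Int × Int),
      (PySem.List.pyRange 0 n 1).foldl (fun (acc : Int × Int) j =>
        (acc.1 + (if (PySem.List.pyGetD team i 0 = 1) ∧ (PySem.List.pyGetD team j 0 = 1) then pvA s i j else 0),
         acc.2 + (if ¬ (PySem.List.pyGetD team i 0 = 1) ∧ ¬ (PySem.List.pyGetD team j 0 = 1) then pvA s i j else 0))) acc
    = (acc.1 + ((PySem.List.pyRange 0 n 1).map
          (fun j => if (PySem.List.pyGetD team i 0 = 1) ∧ (PySem.List.pyGetD team j 0 = 1) then pvA s i j else 0)).sum,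
       acc.2 + ((PySem.List.pyRange 0 n 1).map
          (fun j => if ¬ (PySem.List.pyGetD team i 0 = 1) ∧ ¬ (PySem.List.pyGetD team j 0 = 1) then pvA s i j else 0)).sum) := by
    intro i acc
    rw [← Prod.mk.eta (p := acc), PySem.List.foldl_prod_mk
      (f := fun (a : Int) j => a + (if (PySem.List.pyGetD team i 0 = 1) ∧ (PySem.List.pyGetD team j 0 = 1) then pvA s i j else 0))
      (g := fun (a : Int) j => a + (if ¬ (PySem.List.pyGetD team i 0 = 1) ∧ ¬ (PySem.List.pyGetD team j 0 = 1) then pvA s i j else 0))]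
    rw [PySem.List.foldl_add, PySem.List.foldl_add]
  simp only [hinner]
  rw [PySem.List.foldl_prod_mk
    (f := fun (a : Int) i => a + ((PySem.List.pyRange 0 n 1).map
        (fun j => if (PySem.List.pyGetD team i 0 = 1) ∧ (PySem.List.pyGetD team j 0 = 1) then pvA s i j else 0)).sum)
    (g := fun (a : Int) i => a + ((PySem.List.pyRange 0 n 1).map
        (fun j => if ¬ (PySem.List.pyGetD team i 0 = 1) ∧ ¬ (PySem.List.pyGetD team j 0 = 1) then pvA s i j else 0)).sum)]
  rw [PySem.List.foldl_add, PySem.List.foldl_add]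
  simp

theorem pv_main (team : List Int) (n : Int) (s : List (List Int)) :
    check_ability team n s = check_ability_alt team n s := by
  rw [pv_alt_eq]
  unfold check_ability
  rw [pv_partition_eq]
  simp only [pv_calc_eq]
  rw [pv_double_ite_filter (PySem.List.pyRange 0 n 1) (fun i => PySem.List.pyGetD team i 0 = 1) (pvA s),
      pv_double_ite_filter (PySem.List.pyRange 0 n 1) (fun i => ¬ (PySem.List.pyGetD team i 0 = 1)) (pvA s)]

-- ===== VERDICT (by name: the statement is the Claim_ definition above) =====
theorem check_ability_spec : Claim_equal_check_ability := by
  intro team n s _ _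
  show check_ability team n s = check_ability_alt team n s
  exact pv_main team n s
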